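-- pv_equiv track=rewrite | github.com/mateuszsury/ViperHTTP | tools/gen_parser_vectors.py | c_escape
-- ===== SOURCE A (Python) =====
-- def c_escape(s: str) -> str:
--     out = []
--     for ch in s:
--         o = ord(ch)
--         if ch == '\\':
--             out.append('\\\\')
--         elif ch == '"':
--             out.append('\\"')
--         elif ch == '\n':
--             out.append('\\n')
--         elif ch == '\r':
--             out.append('\\r')
--         elif ch == '\t':
--             out.append('\\t')
--         elif 32 <= o <= 126:
--             out.append(ch)
--         else:
--             out.append('\\x%02x' % o)
--     return '"' + ''.join(out) + '"'
-- ===== SOURCE B (Python) =====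
-- _ESC = {'\\': '\\\\', '"': '\\"', '\n': '\\n', '\r': '\\r', '\t': '\\t'}
--
--
-- def c_escape(s: str) -> str:
--     # span scanner: copy maximal runs of safe printable characters wholesale
--     # by slicing, emit an escape only at each breaker character.
--     parts = []
--     i, n = 0, len(s)
--     while i < n:
--         j = i
--         while j < n:
--             ch = s[j]
--             if ch in _ESC or not (32 <= ord(ch) <= 126):
--                 break
--             j += 1
--         parts.append(s[i:j])
--         if j == n:
--             break
--         ch = s[j]
--         parts.append(_ESC[ch] if ch in _ESC else '\\x%02x' % ord(ch))
--         i = j + 1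
--     return '"%s"' % ''.join(parts)
-- ===== Notes on version B (the rewrite author's own statement) =====
-- stated objective: alternative
-- what changed: Replaced A's per-character loop with an if/elif chain by a span scanner: an index-based outer loop that copies each maximal run of safe printable characters wholesale by slicing and emits an escape (dict lookup or hex fallback) only at each breaker character.
import Mathlib
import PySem

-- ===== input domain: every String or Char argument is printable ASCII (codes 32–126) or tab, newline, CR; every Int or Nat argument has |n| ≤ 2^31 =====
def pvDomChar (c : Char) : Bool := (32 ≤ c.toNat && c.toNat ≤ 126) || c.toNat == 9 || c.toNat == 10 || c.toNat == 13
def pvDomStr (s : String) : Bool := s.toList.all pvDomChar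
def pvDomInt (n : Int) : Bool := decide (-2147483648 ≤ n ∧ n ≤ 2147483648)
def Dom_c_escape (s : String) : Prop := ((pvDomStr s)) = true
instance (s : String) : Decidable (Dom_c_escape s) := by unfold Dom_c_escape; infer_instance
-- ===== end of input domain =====

-- B replaces A's per-character loop by a span scanner: it copies maximal runs of
-- safe printable characters wholesale (slicing) and escapes only at breakers;
-- an alternative decomposition with the same output.

-- shared helper: '%02x' % o (lowercase hex, zero-padded to width 2) — both Pythons use this format
def pvHex02 (o : Nat) : List Char :=
  let d := Nat.toDigits 16 o
  if d.length < 2 then '0' :: d else d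

-- ===== PORT A =====
-- A's if/elif chain body, one character
def pvEscBranchA (ch : Char) : List Char :=
  let o := ch.toNat
  if ch = '\\' then ['\\', '\\']
  else if ch = '"' then ['\\', '"']
  else if ch = '\n' then ['\\', 'n']
  else if ch = '\r' then ['\\', 'r']
  else if ch = '\t' then ['\\', 't']
  else if 32 ≤ o ∧ o ≤ 126 then [ch]
  else '\\' :: 'x' :: pvHex02 o

def c_escape (s : String) : String :=
  -- out = []; for ch in s: out.append(<branch>); return '"' + ''.join(out) + '"'
  let out : List (List Char) := s.toList.foldl (fun out ch => out ++ [pvEscBranchA ch]) []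
  String.ofList ('"' :: out.flatten ++ ['"'])

-- ===== PORT B =====
-- the module-level dict _ESC, keyed by the character itself
def pvEscDict : PySem.Dict Char (List Char) :=
  PySem.Dict.ofList [('\\', ['\\', '\\']), ('"', ['\\', '"']),
                     ('\n', ['\\', 'n']), ('\r', ['\\', 'r']), ('\t', ['\\', 't'])]

-- inner while condition: the characters the inner loop skips over (safe run)
def pvSafeB (ch : Char) : Bool :=
  !(PySem.Dict.contains pvEscDict ch) && (32 ≤ ch.toNat && ch.toNat ≤ 126)

-- '_ESC[ch] if ch in _ESC else "\\x%02x" % ord(ch)' at a breaker character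
def pvEscBreak (ch : Char) : List Char :=
  if PySem.Dict.contains pvEscDict ch
  then (PySem.Dict.get? pvEscDict ch).getD []
  else '\\' :: 'x' :: pvHex02 ch.toNat

-- the outer while loop: take the safe span s[i:j], stop at end, else escape the breaker and continue
def pvEscSpans (l : List Char) : List Char :=
  let safe := l.takeWhile pvSafeB
  match h : l.dropWhile pvSafeB with
  | [] => safe
  | ch :: tl => safe ++ pvEscBreak ch ++ pvEscSpans tl
termination_by l.length
decreasing_by
  have hle := List.length_dropWhile_le pvSafeB l
  rw [h] at hle; simp at hle; omega

def c_escape_alt (s : String) : String :=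
  -- '"%s"' % ''.join(parts)
  String.ofList ('"' :: pvEscSpans s.toList ++ ['"'])

-- ===== PRECONDITION & SPEC =====
def Spec_c_escape (s : String) (out : String) : Prop := out = c_escape_alt s
instance (s : String) (out : String) : Decidable (Spec_c_escape s out) := by unfold Spec_c_escape; infer_instance

-- ===== CLAIM (what is proved, stated in full; the proofs are below) =====
def Claim_equal_c_escape : Prop := ∀ (s : String), Dom_c_escape s → Spec_c_escape s (c_escape s)

-- ===== LEMMAS AND PROOFS =====
-- a safe character is left verbatim by A's chain
theorem pvEsc_safe (ch : Char) (h : pvSafeB ch = true) : pvEscBranchA ch = [ch] := by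
  simp [pvSafeB] at h
  obtain ⟨hc, h32, h126⟩ := h
  have e92 : ¬ ch = '\\' := fun he => by subst he; revert hc; decide
  have e34 : ¬ ch = '"' := fun he => by subst he; revert hc; decide
  have e10 : ¬ ch = '\n' := fun he => by subst he; revert hc; decide
  have e13 : ¬ ch = '\r' := fun he => by subst he; revert hc; decide
  have e9 : ¬ ch = '\t' := fun he => by subst he; revert hc; decide
  simp [pvEscBranchA, e92, e34, e10, e13, e9, h32, h126]

-- at a breaker, A's chain and B's dict-or-hex agree
theorem pvEsc_break (ch : Char) (h : pvSafeB ch = false) : pvEscBranchA ch = pvEscBreak ch := by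
  by_cases h92 : ch = '\\'
  · subst h92; decide
  by_cases h34 : ch = '"'
  · subst h34; decide
  by_cases h10 : ch = '\n'
  · subst h10; decide
  by_cases h13 : ch = '\r'
  · subst h13; decide
  by_cases h9 : ch = '\t'
  · subst h9; decide
  -- not one of the five keys: contains is false
  have hb92 : ('\\' == ch) = false := by simpa using fun he => h92 he.symm
  have hb34 : ('"' == ch) = false := by simpa using fun he => h34 he.symm
  have hb10 : ('\n' == ch) = false := by simpa using fun he => h10 he.symm
  have hb13 : ('\r' == ch) = false := by simpa using fun he => h13 he.symm
  have hb9 : ('\t' == ch) = false := by simpa using fun he => h9 he.symm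
  have hd : pvEscDict = PySem.Dict.mk [('\\', ['\\', '\\']), ('"', ['\\', '"']),
      ('\n', ['\\', 'n']), ('\r', ['\\', 'r']), ('\t', ['\\', 't'])] := by decide
  have hcont : PySem.Dict.contains pvEscDict ch = false := by
    rw [hd]; simp [hb92, hb34, hb10, hb13, hb9]
  have hnp : ¬ (32 ≤ ch.toNat ∧ ch.toNat ≤ 126) := by
    simp [pvSafeB, hcont] at h
    omega
  simp [pvEscBranchA, pvEscBreak, h92, h34, h10, h13, h9, hnp, hcont]

-- a run of safe characters is emitted verbatim
theorem pvEsc_run (l : List Char) (h : ∀ x ∈ l, pvSafeB x = true) :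
    (l.map pvEscBranchA).flatten = l := by
  induction l with
  | nil => rfl
  | cons a t ih =>
      have ha := pvEsc_safe a (h a (by simp))
      simp [ha, ih fun x hx => h x (by simp [hx])]

-- the two branches of B's outer loop, as unfolding equations
theorem pvEscSpans_nil (l : List Char) (h : l.dropWhile pvSafeB = []) :
    pvEscSpans l = l.takeWhile pvSafeB := by
  rw [pvEscSpans]; split <;> simp_all

theorem pvEscSpans_cons (l : List Char) (ch : Char) (tl : List Char)
    (h : l.dropWhile pvSafeB = ch :: tl) :
    pvEscSpans l = l.takeWhile pvSafeB ++ pvEscBreak ch ++ pvEscSpans tl := by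
  rw [pvEscSpans]; split <;> simp_all

-- B's span scanner computes A's per-character concatenation
theorem pvEscSpans_eq (l : List Char) : pvEscSpans l = (l.map pvEscBranchA).flatten := by
  induction l using pvEscSpans.induct with
  | case1 l h =>
      have hl : l.takeWhile pvSafeB = l := by
        have := List.takeWhile_append_dropWhile (p := pvSafeB) (l := l)
        simpa [h] using this
      rw [pvEscSpans_nil l h, hl]
      exact (pvEsc_run l (fun x hx => List.mem_takeWhile_imp (by rwa [hl]))).symm
  | case2 l ch tl h ih =>
      have hdecomp : l = l.takeWhile pvSafeB ++ ch :: tl := by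
        conv_lhs => rw [← List.takeWhile_append_dropWhile (p := pvSafeB) (l := l)]
        rw [h]
      have hch : pvSafeB ch = false := by
        have := List.head_dropWhile_not pvSafeB (l := l) (by simp [h])
        simpa [h] using this
      rw [pvEscSpans_cons l ch tl h, ih]
      conv_rhs => rw [hdecomp]
      simp [pvEsc_run _ (fun x hx => List.mem_takeWhile_imp hx), pvEsc_break ch hch]

-- ===== VERDICT (by name: the statement is the Claim_ definition above) =====
theorem c_escape_spec : Claim_equal_c_escape := by
  intro s _
  unfold Spec_c_escape c_escape c_escape_alt
  rw [PySem.List.foldl_append_singleton_eq_map, pvEscSpans_eq]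
  simp
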